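-- pv_equiv track=rewrite | github.com/MaxwellVolz/advent_of_code | 03/03_p2v2.py | new_scrubber_rating
-- ===== SOURCE A (Python) =====
-- def new_scrubber_rating(scrubber_rating, current_iteration):
--     if len(scrubber_rating) == 1:
--         return scrubber_rating
--
--     current_index_list = [bit[current_iteration] for bit in scrubber_rating]
--
--     zero_bits = [bit for bit in current_index_list if bit == '0']
--     one_bits = [bit for bit in current_index_list if bit == '1']
--
--     amt_of_zeroes = len(zero_bits)
--     amt_of_ones = len(one_bits)
--
--     if amt_of_zeroes == amt_of_ones:
--         return [bits for bits in scrubber_rating if bits[current_iteration] == '0']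
--     elif amt_of_zeroes > amt_of_ones:
--         return [bits for bits in scrubber_rating if bits[current_iteration] == '1']
--     else:
--         return [bits for bits in scrubber_rating if bits[current_iteration] == '0']
-- ===== SOURCE B (Python) =====
-- def new_scrubber_rating(scrubber_rating, current_iteration):
--     if len(scrubber_rating) == 1:
--         return scrubber_rating
--     zeros, ones = [], []
--     for s in scrubber_rating:
--         c = s[current_iteration]
--         if c == '0':
--             zeros.append(s)
--         elif c == '1':
--             ones.append(s)
--     if len(zeros) > len(ones):
--         return ones
--     return zeros
-- ===== Notes on version B (the rewrite author's own statement) =====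
-- stated objective: simpler
-- what changed: One partition pass collects the '0'-strings and '1'-strings simultaneously, so the index-character list, the two counting comprehensions and the third filtering comprehension all disappear; the list lengths give the counts and one of the two lists is the answer.
import Mathlib
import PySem

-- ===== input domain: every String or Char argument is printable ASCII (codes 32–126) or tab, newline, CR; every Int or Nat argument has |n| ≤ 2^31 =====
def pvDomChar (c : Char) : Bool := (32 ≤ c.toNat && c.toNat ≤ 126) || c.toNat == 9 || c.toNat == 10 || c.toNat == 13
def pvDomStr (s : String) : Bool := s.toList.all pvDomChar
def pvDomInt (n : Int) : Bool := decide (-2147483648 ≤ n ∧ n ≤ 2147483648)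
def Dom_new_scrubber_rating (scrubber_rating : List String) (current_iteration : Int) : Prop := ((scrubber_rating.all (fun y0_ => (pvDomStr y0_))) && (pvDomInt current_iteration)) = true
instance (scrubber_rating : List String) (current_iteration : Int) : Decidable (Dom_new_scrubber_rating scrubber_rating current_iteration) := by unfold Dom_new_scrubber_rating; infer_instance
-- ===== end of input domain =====

-- B replaces A's index-list plus three comprehensions by a single partition pass; objective: simpler.

-- ===== PORT A =====
-- bit[current_iteration]; the ' ' default is never reached under Pre_ (pyGet? = some there)
def pvCharAt (s : String) (i : Int) : Char := (PySem.Str.pyGet? s i).getD ' '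

def new_scrubber_rating (scrubber_rating : List String) (current_iteration : Int) : List String :=
  if scrubber_rating.length == 1 then scrubber_rating
  else
    let current_index_list := scrubber_rating.map (fun bit => pvCharAt bit current_iteration)
    let zero_bits := current_index_list.filter (fun bit => bit == '0')
    let one_bits := current_index_list.filter (fun bit => bit == '1')
    let amt_of_zeroes := zero_bits.length
    let amt_of_ones := one_bits.length
    if amt_of_zeroes == amt_of_ones then
      scrubber_rating.filter (fun bits => pvCharAt bits current_iteration == '0')
    else if amt_of_zeroes > amt_of_ones then
      scrubber_rating.filter (fun bits => pvCharAt bits current_iteration == '1')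
    else
      scrubber_rating.filter (fun bits => pvCharAt bits current_iteration == '0')

-- ===== PORT B =====
-- the single loop of Source B: fold over the list, appending each string to zeros or ones
def pvPartitionLoop (sr : List String) (i : Int) : List String × List String :=
  sr.foldl (fun acc s =>
    let c := pvCharAt s i
    if c == '0' then (acc.1 ++ [s], acc.2)
    else if c == '1' then (acc.1, acc.2 ++ [s])
    else acc) ([], [])

def new_scrubber_rating_alt (scrubber_rating : List String) (current_iteration : Int) : List String :=
  if scrubber_rating.length == 1 then scrubber_rating
  else
    let p := pvPartitionLoop scrubber_rating current_iteration
    if p.1.length > p.2.length then p.2 else p.1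

-- ===== PRECONDITION & SPEC =====
-- Pre_ excludes exactly the inputs on which Python A raises IndexError: when more than one
-- string is given, current_iteration must be a valid (possibly negative) index into every string.
def Pre_new_scrubber_rating (scrubber_rating : List String) (current_iteration : Int) : Prop :=
  scrubber_rating.length = 1 ∨
    ∀ s ∈ scrubber_rating, PySem.Raise.InRange s.length current_iteration
instance (scrubber_rating : List String) (current_iteration : Int) : Decidable (Pre_new_scrubber_rating scrubber_rating current_iteration) := by unfold Pre_new_scrubber_rating; infer_instance

def pvWitness_new_scrubber_rating : List String × Int := (["01", "10", "11"], 0)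

def Spec_new_scrubber_rating (scrubber_rating : List String) (current_iteration : Int) (out : List String) : Prop := out = new_scrubber_rating_alt scrubber_rating current_iteration
instance (scrubber_rating : List String) (current_iteration : Int) (out : List String) : Decidable (Spec_new_scrubber_rating scrubber_rating current_iteration out) := by unfold Spec_new_scrubber_rating; infer_instance

-- ===== CLAIM (what is proved, stated in full; the proofs are below) =====
def Claim_equal_new_scrubber_rating : Prop := ∀ (scrubber_rating : List String) (current_iteration : Int), Dom_new_scrubber_rating scrubber_rating current_iteration → Pre_new_scrubber_rating scrubber_rating current_iteration → Spec_new_scrubber_rating scrubber_rating current_iteration (new_scrubber_rating scrubber_rating current_iteration)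

-- ===== LEMMAS AND PROOFS =====

-- the partition loop computes the two filters, for any starting accumulator
theorem pvPartitionLoop_eq_filters (sr : List String) (i : Int) :
    pvPartitionLoop sr i =
      (sr.filter (fun s => pvCharAt s i == '0'), sr.filter (fun s => pvCharAt s i == '1')) := by
  suffices h : ∀ (l : List String) (z o : List String),
      l.foldl (fun acc s =>
        let c := pvCharAt s i
        if c == '0' then (acc.1 ++ [s], acc.2)
        else if c == '1' then (acc.1, acc.2 ++ [s])
        else acc) (z, o) =
      (z ++ l.filter (fun s => pvCharAt s i == '0'), o ++ l.filter (fun s => pvCharAt s i == '1')) by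
    simpa [pvPartitionLoop] using h sr [] []
  intro l
  induction l with
  | nil => simp
  | cons s t ih =>
    intro z o
    by_cases h0 : pvCharAt s i = '0'
    · simpa [List.foldl_cons, h0, List.filter_cons] using ih (z ++ [s]) o
    · by_cases h1 : pvCharAt s i = '1'
      · simpa [List.foldl_cons, h0, h1, List.filter_cons] using ih z (o ++ [s])
      · simpa [List.foldl_cons, h0, h1, List.filter_cons] using ih z o

-- counting the extracted characters equals counting the strings by their character
theorem pvCount_eq (sr : List String) (i : Int) (c : Char) :
    ((sr.map (fun s => pvCharAt s i)).filter (fun b => b == c)).length =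
      (sr.filter (fun s => pvCharAt s i == c)).length := by
  induction sr with
  | nil => rfl
  | cons s t ih =>
    by_cases h : pvCharAt s i = c <;> simp [h, ih]

-- ===== VERDICT (by name: the statement is the Claim_ definition above) =====
theorem new_scrubber_rating_spec : Claim_equal_new_scrubber_rating := by
  intro sr i _ _
  unfold Spec_new_scrubber_rating new_scrubber_rating new_scrubber_rating_alt
  by_cases hlen : sr.length = 1
  · simp [hlen]
  · simp only [hlen, beq_iff_eq, if_false, pvPartitionLoop_eq_filters, pvCount_eq]
    set z := sr.filter (fun s => pvCharAt s i == '0') with hz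
    set o := sr.filter (fun s => pvCharAt s i == '1') with ho
    rcases lt_trichotomy z.length o.length with h | h | h
    · simp [Nat.ne_of_lt h, Nat.not_lt_of_lt h]
    · simp [h]
    · simp [Nat.ne_of_gt h, h]
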